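-- pv_equiv track=rewrite | github.com/MarkC11235/cryptography | hw1.py | mult_base_26
-- ===== SOURCE A (Python) =====
-- def to_base_26(num):
--     base_26 = ""
--     while num > 0:
--         remainder = num % 26
--         num = num // 26
--         base_26 = chr(65 + remainder) + base_26
--     return base_26
--
-- def int_equivalent_of_char(char): # A = 0, B = 1, ..., Z = 25
--     return ord(char) - 65
--
-- def mult_base_26(num1, num2): # this starts at the highest power of 26
--     sum = 0
--     for i in range(len(num1)):
--         a = int_equivalent_of_char(num1[i])
--         for j in range(len(num2)):
--             b = int_equivalent_of_char(num2[j])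
--             sum += (a * 26 ** (len(num1) - i - 1)) * (b * 26 ** (len(num2) - j - 1))
--     return to_base_26(sum)
-- ===== SOURCE B (Python) =====
-- def mult_base_26(num1, num2):
--     # Horner-evaluate each base-26 string once, multiply the two values,
--     # then emit digits of the product least-significant first and reverse.
--     v1 = 0
--     for c in num1:
--         v1 = v1 * 26 + (ord(c) - 65)
--     v2 = 0
--     for c in num2:
--         v2 = v2 * 26 + (ord(c) - 65)
--     p = v1 * v2
--     digits = []
--     while p > 0:
--         p, r = divmod(p, 26)
--         digits.append(chr(65 + r))
--     return ''.join(reversed(digits))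
-- ===== Notes on version B (the rewrite author's own statement) =====
-- stated objective: faster
-- what changed: Instead of A's nested loop over all digit pairs (O(n*m) terms each with big power computations), B Horner-evaluates each string to its integer value in one pass, multiplies once, and converts the product back by repeated divmod building the digit list least-significant-first.
import Mathlib
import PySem

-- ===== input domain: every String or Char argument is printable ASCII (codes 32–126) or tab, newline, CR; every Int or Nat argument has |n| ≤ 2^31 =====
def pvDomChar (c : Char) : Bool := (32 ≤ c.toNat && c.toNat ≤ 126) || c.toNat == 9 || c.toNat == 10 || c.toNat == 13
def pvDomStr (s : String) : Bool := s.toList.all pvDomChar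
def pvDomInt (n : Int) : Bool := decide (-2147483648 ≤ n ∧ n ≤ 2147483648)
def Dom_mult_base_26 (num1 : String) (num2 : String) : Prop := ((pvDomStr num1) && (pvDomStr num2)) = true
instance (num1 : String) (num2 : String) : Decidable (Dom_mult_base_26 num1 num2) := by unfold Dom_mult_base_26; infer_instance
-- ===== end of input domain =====

-- B replaces A's O(n*m) digit-pair double loop by one-pass Horner evaluation of each
-- string, a single multiplication, and a divmod digit loop (asymptotically faster).

-- ===== PORT A =====
-- helper to_base_26: the while-loop prepends chr(65 + num % 26) while num > 0
def pvToBase26Loop (num : Int) (acc : List Char) : List Char :=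
  if h : num > 0 then
    let remainder := PySem.Int.mod num 26
    let num' := PySem.Int.floordiv num 26
    pvToBase26Loop num' (Char.ofNat (65 + remainder).toNat :: acc)
  else acc
termination_by num.toNat
decreasing_by
  have h1 : PySem.Int.floordiv num 26 = num / 26 := PySem.Int.floordiv_eq_ediv_of_pos (by omega)
  simp only [h1]; omega

def to_base_26 (num : Int) : String := String.ofList (pvToBase26Loop num [])

def int_equivalent_of_char (c : Char) : Int := (c.toNat : Int) - 65

def mult_base_26 (num1 : String) (num2 : String) : String :=
  let l1 := num1.toList
  let l2 := num2.toList
  let sum : Int := (List.range l1.length).foldl (fun s i =>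
    let a := int_equivalent_of_char (l1.getD i 'A')
    (List.range l2.length).foldl (fun s j =>
      let b := int_equivalent_of_char (l2.getD j 'A')
      s + (a * 26 ^ (l1.length - i - 1)) * (b * 26 ^ (l2.length - j - 1))) s) 0
  to_base_26 sum

-- ===== PORT B =====
-- Horner evaluation: v = v*26 + (ord(c) - 65) over the characters
def pvHorner (l : List Char) : Int := l.foldl (fun v c => v * 26 + ((c.toNat : Int) - 65)) 0

-- digits of p, least significant first (appended), while p > 0
def pvAltDigits (p : Int) (digits : List Char) : List Char :=
  if _h : p > 0 then
    let q := PySem.Int.floordiv p 26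
    let r := PySem.Int.mod p 26
    pvAltDigits q (digits ++ [Char.ofNat (65 + r).toNat])
  else digits
termination_by p.toNat
decreasing_by
  have h1 : PySem.Int.floordiv p 26 = p / 26 := PySem.Int.floordiv_eq_ediv_of_pos (by omega)
  simp only [h1]; omega

def mult_base_26_alt (num1 : String) (num2 : String) : String :=
  let v1 := pvHorner num1.toList
  let v2 := pvHorner num2.toList
  String.ofList (pvAltDigits (v1 * v2) []).reverse

-- ===== PRECONDITION & SPEC =====
def Spec_mult_base_26 (num1 : String) (num2 : String) (out : String) : Prop := out = mult_base_26_alt num1 num2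
instance (num1 : String) (num2 : String) (out : String) : Decidable (Spec_mult_base_26 num1 num2 out) := by unfold Spec_mult_base_26; infer_instance

-- ===== CLAIM (what is proved, stated in full; the proofs are below) =====
def Claim_equal_mult_base_26 : Prop := ∀ (num1 : String) (num2 : String), Dom_mult_base_26 num1 num2 → Spec_mult_base_26 num1 num2 (mult_base_26 num1 num2)

-- ===== LEMMAS AND PROOFS =====

-- B's digit loop with any accumulator = accumulator ++ loop from []
theorem pvAltDigits_append (p : Int) (acc : List Char) :
    pvAltDigits p acc = acc ++ pvAltDigits p [] := by
  by_cases h : p > 0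
  · conv_lhs => rw [pvAltDigits]
    conv_rhs => rw [pvAltDigits]
    simp only [h, dite_true]
    rw [pvAltDigits_append (PySem.Int.floordiv p 26) (acc ++ _),
        pvAltDigits_append (PySem.Int.floordiv p 26) ([] ++ _)]
    simp
  · conv_lhs => rw [pvAltDigits]
    conv_rhs => rw [pvAltDigits]
    simp [h]
termination_by p.toNat
decreasing_by
  all_goals
    have h1 : PySem.Int.floordiv p 26 = p / 26 := PySem.Int.floordiv_eq_ediv_of_pos (by omega)
    simp only [h1]; omega

-- A's prepend loop produces exactly the reverse of B's append loop
theorem pvToBase26Loop_eq (p : Int) (acc : List Char) :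
    pvToBase26Loop p acc = (pvAltDigits p []).reverse ++ acc := by
  by_cases h : p > 0
  · conv_lhs => rw [pvToBase26Loop]
    simp only [h, dite_true]
    rw [pvToBase26Loop_eq (PySem.Int.floordiv p 26)]
    conv_rhs => rw [pvAltDigits]
    simp only [h, dite_true]
    conv_rhs => rw [pvAltDigits_append]
    simp
  · conv_lhs => rw [pvToBase26Loop]
    conv_rhs => rw [pvAltDigits]
    simp [h]
termination_by p.toNat
decreasing_by
  have h1 : PySem.Int.floordiv p 26 = p / 26 := PySem.Int.floordiv_eq_ediv_of_pos (by omega)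
  simp only [h1]; omega

-- positional weight sum of a string's characters
def pvWeighted (l : List Char) : Int :=
  ((List.range l.length).map
    (fun i => int_equivalent_of_char (l.getD i 'A') * 26 ^ (l.length - i - 1))).sum

-- Horner evaluation equals the positional weight sum
theorem pvHorner_eq_weighted (l : List Char) : pvHorner l = pvWeighted l := by
  induction l using List.reverseRecOn with
  | nil => simp [pvHorner, pvWeighted]
  | append_singleton l' c ih =>
    have hfold : pvHorner (l' ++ [c]) = pvHorner l' * 26 + ((c.toNat : Int) - 65) := by
      simp [pvHorner, List.foldl_append]
    rw [hfold, ih]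
    simp only [pvWeighted, List.length_append, List.length_singleton]
    rw [List.range_succ, List.map_append, List.sum_append]
    have hlast : ((([l'.length].map
        (fun i => int_equivalent_of_char ((l' ++ [c]).getD i 'A') *
          26 ^ (l'.length + 1 - i - 1)))).sum) = ((c.toNat : Int) - 65) := by
      simp [int_equivalent_of_char, List.getD]
    rw [hlast]
    congr 1
    have hmap : (List.range l'.length).map
        (fun i => int_equivalent_of_char ((l' ++ [c]).getD i 'A') * 26 ^ (l'.length + 1 - i - 1))
        = (List.range l'.length).map
        (fun i => (int_equivalent_of_char (l'.getD i 'A') * 26 ^ (l'.length - i - 1)) * 26) := by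
      apply List.map_congr_left
      intro i hi
      have hi' : i < l'.length := List.mem_range.mp hi
      rw [List.getD_append l' [c] 'A' i hi']
      have : l'.length + 1 - i - 1 = (l'.length - i - 1) + 1 := by omega
      rw [this]; ring
    rw [hmap, List.sum_map_mul_right]

-- A's double loop computes the product of the two weighted sums
theorem pvSum_eq_mul (l1 l2 : List Char) :
    (List.range l1.length).foldl (fun s i =>
      let a := int_equivalent_of_char (l1.getD i 'A')
      (List.range l2.length).foldl (fun s j =>
        let b := int_equivalent_of_char (l2.getD j 'A')
        s + (a * 26 ^ (l1.length - i - 1)) * (b * 26 ^ (l2.length - j - 1))) s) 0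
    = pvWeighted l1 * pvWeighted l2 := by
  have hinner : ∀ (a acc : Int),
      (List.range l2.length).foldl (fun s j =>
        s + a * (int_equivalent_of_char (l2.getD j 'A') * 26 ^ (l2.length - j - 1))) acc
      = acc + a * pvWeighted l2 := by
    intro a acc
    rw [PySem.List.foldl_add (l := List.range l2.length) (a := acc)
      (g := fun j => a * (int_equivalent_of_char (l2.getD j 'A') * 26 ^ (l2.length - j - 1))),
      List.sum_map_mul_left]
    rfl
  have hcongr : (List.range l1.length).foldl (fun s i =>
      let a := int_equivalent_of_char (l1.getD i 'A')
      (List.range l2.length).foldl (fun s j =>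
        let b := int_equivalent_of_char (l2.getD j 'A')
        s + (a * 26 ^ (l1.length - i - 1)) * (b * 26 ^ (l2.length - j - 1))) s) 0
    = (List.range l1.length).foldl (fun s i =>
        s + (int_equivalent_of_char (l1.getD i 'A') * 26 ^ (l1.length - i - 1)) *
          pvWeighted l2) 0 := by
    apply PySem.List.foldl_congr_mem
    intro acc i _
    exact hinner (int_equivalent_of_char (l1.getD i 'A') * 26 ^ (l1.length - i - 1)) acc
  rw [hcongr, PySem.List.foldl_add (l := List.range l1.length) (a := 0)
      (g := fun i => (int_equivalent_of_char (l1.getD i 'A') * 26 ^ (l1.length - i - 1)) *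
        pvWeighted l2),
    List.sum_map_mul_right, zero_add]
  rfl

-- ===== VERDICT (by name: the statement is the Claim_ definition above) =====
theorem mult_base_26_spec : Claim_equal_mult_base_26 := by
  intro num1 num2 _
  unfold Spec_mult_base_26 mult_base_26 mult_base_26_alt to_base_26
  simp only
  rw [pvSum_eq_mul, ← pvHorner_eq_weighted, ← pvHorner_eq_weighted,
    pvToBase26Loop_eq]
  simp
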